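-- pv_equiv track=rewrite | github.com/ElkiIgolki/homework | hard.py | generate_password
-- ===== SOURCE A (Python) =====
-- def generate_password(n):
--     password = []
--     for i in range(1, n):
--         for j in range(i + 1, n + 1):
--             if n % (i + j) == 0:
--                 password.append(f"{i}{j}")
--     result = ''.join(password)
--     return result
-- ===== SOURCE B (Python) =====
-- def generate_password(n):
--     if n < 3:
--         return ""
--     divs = [s for s in range(3, n + 1) if n % s == 0]
--     return ''.join(f"{i}{s - i}" for i in range(1, n) for s in divs if 2 * i < s)
-- ===== Notes on version B (the rewrite author's own statement) =====
-- stated objective: faster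
-- what changed: Instead of testing n % (i+j) for every pair (i,j), B precomputes the divisor list of n once in one O(n) pass and, for each i, emits f"{i}{s-i}" only for the few divisors s > 2*i, removing the O(n) inner scan.
import Mathlib
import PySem

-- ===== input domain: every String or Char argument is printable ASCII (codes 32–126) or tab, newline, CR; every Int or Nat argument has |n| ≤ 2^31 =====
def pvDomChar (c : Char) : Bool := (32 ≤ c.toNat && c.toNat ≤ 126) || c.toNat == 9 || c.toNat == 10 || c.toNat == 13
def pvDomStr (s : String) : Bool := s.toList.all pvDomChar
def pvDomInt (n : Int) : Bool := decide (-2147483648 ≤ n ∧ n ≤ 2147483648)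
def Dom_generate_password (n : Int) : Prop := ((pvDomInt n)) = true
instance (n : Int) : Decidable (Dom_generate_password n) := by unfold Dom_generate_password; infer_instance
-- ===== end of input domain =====

-- B precomputes n's divisor list once and emits pairs from it, instead of A's O(n^2) pair scan (objective: faster).

-- ===== PORT A =====
def generate_password (n : Int) : String :=
  let password : List String :=
    (PySem.List.pyRange 1 n 1).foldl (fun acc i =>
      (PySem.List.pyRange (i + 1) (n + 1) 1).foldl (fun acc2 j =>
        if PySem.Int.mod n (i + j) == 0 then acc2 ++ [PySem.Int.toStr i ++ PySem.Int.toStr j]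
        else acc2) acc) []
  PySem.Str.join "" password

-- ===== PORT B =====
def generate_password_alt (n : Int) : String :=
  if n < 3 then ""
  else
    let divs : List Int := (PySem.List.pyRange 3 (n + 1) 1).filter (fun s => PySem.Int.mod n s == 0)
    PySem.Str.join "" ((PySem.List.pyRange 1 n 1).flatMap (fun i =>
      (divs.filter (fun s => decide (2 * i < s))).map
        (fun s => PySem.Int.toStr i ++ PySem.Int.toStr (s - i))))

-- ===== PRECONDITION & SPEC =====
def Spec_generate_password (n : Int) (out : String) : Prop := out = generate_password_alt n
instance (n : Int) (out : String) : Decidable (Spec_generate_password n out) := by unfold Spec_generate_password; infer_instance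

-- ===== CLAIM (what is proved, stated in full; the proofs are below) =====
def Claim_equal_generate_password : Prop := ∀ (n : Int), Dom_generate_password n → Spec_generate_password n (generate_password n)

-- ===== LEMMAS AND PROOFS =====

-- shifting a step-1 range
lemma pyRange_map_add (c a b : Int) :
    (PySem.List.pyRange a b 1).map (fun j => c + j) = PySem.List.pyRange (a + c) (b + c) 1 := by
  simp only [PySem.List.pyRange_one, List.map_map]
  have hb : b + c - (a + c) = b - a := by ring
  rw [hb]
  apply List.map_congr_left
  intro x _
  simp only [Function.comp_apply]
  ring

-- the divisors of n above 2*i, taken from B's divisor list, are exactly the sums i+j that A tests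
lemma filter_divs (n i : Int) (hn : 3 ≤ n) (hi : 1 ≤ i) :
    ((PySem.List.pyRange 3 (n + 1) 1).filter (fun s => PySem.Int.mod n s == 0)).filter
        (fun s => decide (2 * i < s))
      = (PySem.List.pyRange (2 * i + 1) (i + n + 1) 1).filter (fun s => PySem.Int.mod n s == 0) := by
  have hpairL : List.Pairwise (· < ·)
      (((PySem.List.pyRange 3 (n + 1) 1).filter (fun s => PySem.Int.mod n s == 0)).filter
        (fun s => decide (2 * i < s))) :=
    ((PySem.List.pairwise_lt_pyRange_one 3 (n + 1)).sublist
      (List.filter_sublist.trans List.filter_sublist))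
  have hpairR : List.Pairwise (· < ·)
      ((PySem.List.pyRange (2 * i + 1) (i + n + 1) 1).filter (fun s => PySem.Int.mod n s == 0)) :=
    ((PySem.List.pairwise_lt_pyRange_one (2 * i + 1) (i + n + 1)).sublist List.filter_sublist)
  have hmem : ∀ s : Int,
      (s ∈ ((PySem.List.pyRange 3 (n + 1) 1).filter (fun s => PySem.Int.mod n s == 0)).filter
        (fun s => decide (2 * i < s))) ↔
      (s ∈ (PySem.List.pyRange (2 * i + 1) (i + n + 1) 1).filter (fun s => PySem.Int.mod n s == 0)) := by
    intro s
    simp only [List.mem_filter, PySem.List.mem_pyRange_one, decide_eq_true_eq, beq_iff_eq,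
      PySem.Int.mod_eq_zero_iff_dvd]
    constructor
    · rintro ⟨⟨⟨h3, hsn⟩, hdvd⟩, h2i⟩
      exact ⟨⟨by omega, by omega⟩, hdvd⟩
    · rintro ⟨⟨hlo, hhi⟩, hdvd⟩
      have hs0 : 0 < s := by omega
      have hle : s ≤ n := Int.le_of_dvd (by omega) hdvd
      exact ⟨⟨⟨by omega, by omega⟩, hdvd⟩, by omega⟩
  have hperm :
      (((PySem.List.pyRange 3 (n + 1) 1).filter (fun s => PySem.Int.mod n s == 0)).filter
        (fun s => decide (2 * i < s))).Perm
      ((PySem.List.pyRange (2 * i + 1) (i + n + 1) 1).filter (fun s => PySem.Int.mod n s == 0)) := by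
    rw [List.perm_ext_iff_of_nodup
      (hpairL.imp (fun h => ne_of_lt h)) (hpairR.imp (fun h => ne_of_lt h))]
    exact hmem
  exact List.Perm.eq_of_pairwise
    (fun a b _ _ hab hba => absurd hba (not_lt_of_gt hab)) hpairL hpairR hperm

-- per-i: A's inner loop output equals B's per-i comprehension
lemma inner_eq (n i : Int) (hn : 3 ≤ n) (hi : 1 ≤ i) :
    ((PySem.List.pyRange (i + 1) (n + 1) 1).filter (fun j => PySem.Int.mod n (i + j) == 0)).map
        (fun j => PySem.Int.toStr i ++ PySem.Int.toStr j)
      = (((PySem.List.pyRange 3 (n + 1) 1).filter (fun s => PySem.Int.mod n s == 0)).filter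
          (fun s => decide (2 * i < s))).map
          (fun s => PySem.Int.toStr i ++ PySem.Int.toStr (s - i)) := by
  rw [filter_divs n i hn hi]
  have hr : PySem.List.pyRange (2 * i + 1) (i + n + 1) 1
      = (PySem.List.pyRange (i + 1) (n + 1) 1).map (fun j => i + j) := by
    rw [pyRange_map_add i (i + 1) (n + 1)]
    congr 1 <;> ring
  rw [hr, List.filter_map, List.map_map]
  apply List.map_congr_left
  intro j _
  simp only [Function.comp_apply]
  congr 1
  congr 1
  ring

-- ===== VERDICT (by name: the statement is the Claim_ definition above) =====
theorem generate_password_spec : Claim_equal_generate_password := by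
  intro n _
  show generate_password n = generate_password_alt n
  by_cases hn3 : n < 3
  · -- below the first valid pair sum A also builds nothing
    by_cases hn1 : n ≤ 1
    · simp only [generate_password, generate_password_alt, if_pos hn3]
      rw [PySem.List.pyRange_one_eq_nil hn1]
      rfl
    · have h2 : n = 2 := by omega
      subst h2
      decide
  · have hn3' : 3 ≤ n := by omega
    simp only [generate_password, generate_password_alt]
    rw [if_neg (by omega : ¬ n < 3)]
    congr 1
    have houter :
        (PySem.List.pyRange 1 n 1).foldl (fun acc i =>
          (PySem.List.pyRange (i + 1) (n + 1) 1).foldl (fun acc2 j =>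
            if PySem.Int.mod n (i + j) == 0 then acc2 ++ [PySem.Int.toStr i ++ PySem.Int.toStr j]
            else acc2) acc) ([] : List String)
        = (PySem.List.pyRange 1 n 1).flatMap (fun i =>
            ((PySem.List.pyRange (i + 1) (n + 1) 1).filter
              (fun j => PySem.Int.mod n (i + j) == 0)).map
              (fun j => PySem.Int.toStr i ++ PySem.Int.toStr j)) := by
      have hstep :
          (PySem.List.pyRange 1 n 1).foldl (fun acc i =>
            (PySem.List.pyRange (i + 1) (n + 1) 1).foldl (fun acc2 j =>
              if PySem.Int.mod n (i + j) == 0 then acc2 ++ [PySem.Int.toStr i ++ PySem.Int.toStr j]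
              else acc2) acc) ([] : List String)
          = (PySem.List.pyRange 1 n 1).foldl (fun acc i =>
              acc ++ ((PySem.List.pyRange (i + 1) (n + 1) 1).filter
                (fun j => PySem.Int.mod n (i + j) == 0)).map
                (fun j => PySem.Int.toStr i ++ PySem.Int.toStr j)) ([] : List String) := by
        apply PySem.List.foldl_congr_mem
        intro acc i _
        exact PySem.List.foldl_append_if (fun j => PySem.Int.mod n (i + j) == 0)
          (fun j => PySem.Int.toStr i ++ PySem.Int.toStr j) _ acc
      rw [hstep, PySem.List.foldl_append_eq_flatMap, List.nil_append]
    rw [houter]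
    apply List.flatMap_congr
    intro i hi
    rw [PySem.List.mem_pyRange_one] at hi
    exact inner_eq n i hn3' hi.1
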